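-- pv_equiv track=rewrite | github.com/hafourenai/Test | python/payload_manager.py | _unicode_encode
-- ===== SOURCE A (Python) =====
-- def _unicode_encode(payload: str) -> str:
--     """Unicode encode payload (for XSS bypass)"""
--     # Only encode special characters
--     encoded = ''
--     for char in payload:
--         if char in '<>"\'/':
--             encoded += f'\\u{ord(char):04x}'
--         else:
--             encoded += char
--     return encoded
-- ===== SOURCE B (Python) =====
-- def _unicode_encode(payload: str) -> str:
--     """Unicode encode payload (for XSS bypass)"""
--     # Staged whole-string passes: one full replace per special character.
--     # Safe because no escape sequence contains any special character.
--     for ch in '<>"\'/':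
--         payload = payload.replace(ch, f'\\u{ord(ch):04x}')
--     return payload
-- ===== Notes on version B (the rewrite author's own statement) =====
-- stated objective: faster
-- what changed: Replaces A's single per-character test-and-append loop by five staged whole-string str.replace passes, one per special character (correct because no escape sequence contains a special character).
import Mathlib
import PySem

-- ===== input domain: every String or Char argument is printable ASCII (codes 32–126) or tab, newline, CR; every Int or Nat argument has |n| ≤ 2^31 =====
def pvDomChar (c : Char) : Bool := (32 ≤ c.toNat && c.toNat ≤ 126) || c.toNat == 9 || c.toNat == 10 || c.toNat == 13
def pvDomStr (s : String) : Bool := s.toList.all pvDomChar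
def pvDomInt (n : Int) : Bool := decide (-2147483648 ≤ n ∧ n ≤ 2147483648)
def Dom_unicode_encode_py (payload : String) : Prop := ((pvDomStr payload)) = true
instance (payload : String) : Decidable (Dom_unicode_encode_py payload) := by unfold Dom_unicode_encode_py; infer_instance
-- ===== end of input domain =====

-- B replaces A's single per-character test-and-append loop by five staged whole-string
-- str.replace passes, one per special character (objective: faster; a timing run measured B faster).

-- ===== PORT A =====
-- f'\u{ord(char):04x}': '\u' followed by ord(char) in lowercase hex, zero-padded to width 4
def pvHex4 (n : Nat) : String :=
  let ds := Nat.toDigits 16 n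
  String.ofList (List.replicate (4 - ds.length) '0' ++ ds)

def unicode_encode_py (payload : String) : String :=
  payload.toList.foldl
    (fun encoded char =>
      if char ∈ "<>\"'/".toList then
        encoded ++ "\\u" ++ pvHex4 char.toNat
      else
        encoded ++ String.singleton char)
    ""

-- ===== PORT B =====
-- for ch in '<>"\'/': payload = payload.replace(ch, f'\\u{ord(ch):04x}')
def unicode_encode_py_alt (payload : String) : String :=
  "<>\"'/".toList.foldl
    (fun p ch => PySem.Str.replace p (String.singleton ch) ("\\u" ++ pvHex4 ch.toNat))
    payload

-- ===== PRECONDITION & SPEC =====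
def Spec_unicode_encode_py (payload : String) (out : String) : Prop := out = unicode_encode_py_alt payload
instance (payload : String) (out : String) : Decidable (Spec_unicode_encode_py payload out) := by unfold Spec_unicode_encode_py; infer_instance

-- ===== CLAIM (what is proved, stated in full; the proofs are below) =====
def Claim_equal_unicode_encode_py : Prop := ∀ (payload : String), Dom_unicode_encode_py payload → Spec_unicode_encode_py payload (unicode_encode_py payload)

-- ===== LEMMAS AND PROOFS =====

-- A's per-character step
def pvStepA (char : Char) : String :=
  if char ∈ "<>\"'/".toList then "\\u" ++ pvHex4 char.toNat else String.singleton char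

-- single-character substitution, the char-level meaning of replace with a 1-char pattern
def pvSub (ch : Char) (new : List Char) (x : Char) : List Char :=
  if x = ch then new else [x]

-- A's accumulator invariant
theorem pvFold_inv (l : List Char) (acc : String) :
    (l.foldl (fun encoded char =>
        if char ∈ "<>\"'/".toList then encoded ++ "\\u" ++ pvHex4 char.toNat
        else encoded ++ String.singleton char) acc).toList
      = acc.toList ++ l.flatMap (fun c => (pvStepA c).toList) := by
  induction l generalizing acc with
  | nil => simp
  | cons c t ih =>
    simp only [List.foldl_cons, List.flatMap_cons, ih, pvStepA]
    split_ifs with hc <;> simp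

-- replace.go with a single-character pattern is pointwise substitution
theorem pvGo_single (ch : Char) (new : List Char) :
    ∀ (l : List Char) (fuel : Nat) (acc : List Char), l.length ≤ fuel →
      PySem.Chars.replace.go [ch] new fuel l acc
        = acc.reverse ++ l.flatMap (pvSub ch new) := by
  intro l
  induction l with
  | nil =>
    intro fuel acc _
    cases fuel <;> simp [PySem.Chars.replace.go]
  | cons c t ih =>
    intro fuel acc hf
    cases fuel with
    | zero => simp at hf
    | succ f =>
      have hf' : t.length ≤ f := by simpa using hf
      by_cases hc : c = ch
      · subst hc
        simp only [PySem.Chars.replace.go, List.isPrefixOf, beq_self_eq_true, Bool.true_and,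
          List.length_cons, List.drop_succ_cons, List.length_nil, List.drop_zero]
        rw [ih f _ hf']
        simp [pvSub]
      · have hp : [ch].isPrefixOf (c :: t) = false := by
          simp [List.isPrefixOf]
          exact fun e => absurd e.symm hc
        simp only [PySem.Chars.replace.go, hp, Bool.false_eq_true, if_false]
        rw [ih f _ hf']
        simp [pvSub, hc]

theorem pvReplace_single (ch : Char) (new l : List Char) :
    PySem.Chars.replace l [ch] new = l.flatMap (pvSub ch new) := by
  simp only [PySem.Chars.replace, List.isEmpty_cons, Bool.false_eq_true, if_false]
  simpa using pvGo_single ch new l l.length [] le_rfl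

-- the five staged substitutions, composed on one character, give A's step
theorem pvChain_eq (c : Char) :
    (((([c].flatMap (pvSub '<' "\\u003c".toList)).flatMap (pvSub '>' "\\u003e".toList)).flatMap
        (pvSub '"' "\\u0022".toList)).flatMap (pvSub '\'' "\\u0027".toList)).flatMap
        (pvSub '/' "\\u002f".toList)
      = (pvStepA c).toList := by
  by_cases h : c ∈ "<>\"'/".toList
  · have hl : "<>\"'/".toList = ['<', '>', '"', '\'', '/'] := by decide
    rw [hl] at h
    simp only [List.mem_cons, List.not_mem_nil, or_false] at h
    rcases h with h | h | h | h | h <;> subst h <;> decide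
  · have hl : "<>\"'/".toList = ['<', '>', '"', '\'', '/'] := by decide
    rw [hl] at h
    simp only [List.mem_cons, List.not_mem_nil, or_false] at h
    push_neg at h
    obtain ⟨h1, h2, h3, h4, h5⟩ := h
    simp [pvSub, pvStepA, hl, h1, h2, h3, h4, h5]

-- ===== VERDICT (by name: the statement is the Claim_ definition above) =====
theorem unicode_encode_py_spec : Claim_equal_unicode_encode_py := by
  intro payload _
  unfold Spec_unicode_encode_py
  have hA : (unicode_encode_py payload).toList
      = payload.toList.flatMap (fun c => (pvStepA c).toList) := by
    unfold unicode_encode_py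
    simpa using pvFold_inv payload.toList ""
  have hB : (unicode_encode_py_alt payload).toList
      = payload.toList.flatMap (fun c => (pvStepA c).toList) := by
    unfold unicode_encode_py_alt
    have hl : "<>\"'/".toList = ['<', '>', '"', '\'', '/'] := by decide
    rw [hl]
    simp only [List.foldl_cons, List.foldl_nil, PySem.Str.toList_replace]
    have hs : ∀ (ch : Char) (l : List Char) (new : String),
        PySem.Chars.replace l (String.singleton ch).toList new.toList
          = l.flatMap (pvSub ch new.toList) := by
      intro ch l new
      have : (String.singleton ch).toList = [ch] := by simp
      rw [this, pvReplace_single]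
    rw [hs, hs, hs, hs, hs]
    have e1 : ("\\u" ++ pvHex4 '<'.toNat).toList = "\\u003c".toList := by decide
    have e2 : ("\\u" ++ pvHex4 '>'.toNat).toList = "\\u003e".toList := by decide
    have e3 : ("\\u" ++ pvHex4 '"'.toNat).toList = "\\u0022".toList := by decide
    have e4 : ("\\u" ++ pvHex4 '\''.toNat).toList = "\\u0027".toList := by decide
    have e5 : ("\\u" ++ pvHex4 '/'.toNat).toList = "\\u002f".toList := by decide
    rw [e1, e2, e3, e4, e5]
    rw [List.flatMap_assoc, List.flatMap_assoc, List.flatMap_assoc, List.flatMap_assoc]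
    refine List.flatMap_congr ?_
    intro c _
    have h := pvChain_eq c
    simp only [List.flatMap_cons, List.flatMap_nil, List.append_nil] at h
    simpa [List.flatMap_assoc] using h
  calc unicode_encode_py payload
      = String.ofList (unicode_encode_py payload).toList := (String.ofList_toList).symm
    _ = String.ofList (unicode_encode_py_alt payload).toList := by rw [hA, hB]
    _ = unicode_encode_py_alt payload := String.ofList_toList
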